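-- pv_equiv track=rewrite | github.com/hforge/itools | itools/database/metadata_parser.py | read_name
-- ===== SOURCE A (Python) =====
-- allowed = frozenset(['-', '_', '.', '@'])
--
-- def read_name(line, allowed=allowed):
--     """Reads the property name from the line. Returns the name and the
--     rest of the line:
--
--         name
--         [parameters]value
--     """
--     # Test first character of name
--     c = line[0]
--     if not c.isalnum() and c != '-':
--         raise SyntaxError('unexpected character (%s)' % c)
--
--     # Test the rest
--     idx = 1
--     n = len(line)
--     while idx < n:
--         c = line[idx]
--         if c in (';', ':'):
--             return line[:idx], line[idx:]
--         if c.isalnum() or c in allowed: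
--             idx += 1
--             continue
--         raise SyntaxError("unexpected character '%s' (%s)" % (c, ord(c)))
--
--     raise SyntaxError('unexpected end of line (%s)' % line)
-- ===== SOURCE B (Python) =====
-- # B: two-pass decomposition — find the delimiter position first, then validate the
-- # prefix slice wholesale, then slice; same return value as A wherever A returns.
-- allowed = frozenset(['-', '_', '.', '@'])
--
-- def read_name(line, allowed=allowed):
--     """Reads the property name from the line. Returns the name and the
--     rest of the line:
--
--         name
--         [parameters]value
--     """
--     c = line[0]
--     if not c.isalnum() and c != '-':
--         raise SyntaxError('unexpected character (%s)' % c)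
--     # Position of the first delimiter (';' or ':'), or len(line) if none
--     p = next((k for k, ch in enumerate(line) if ch in (';', ':')), len(line))
--     # Validate everything between the name's first character and the delimiter
--     bad = next((ch for ch in line[1:p] if not ch.isalnum() and ch not in allowed), None)
--     if bad is not None:
--         raise SyntaxError("unexpected character '%s' (%s)" % (bad, ord(bad)))
--     if p == len(line):
--         raise SyntaxError('unexpected end of line (%s)' % line)
--     return line[:p], line[p:]
-- ===== Notes on version B (the rewrite author's own statement) =====
-- stated objective: alternative
-- what changed: A's single interleaved while-loop (test char, return on delimiter, raise on bad char) is replaced by a two-pass decomposition: locate the first ';'/':' delimiter, validate the whole prefix slice line[1:p] in one scan, then return the two slices; Pre_ excludes only inputs where both raise.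
import Mathlib
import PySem

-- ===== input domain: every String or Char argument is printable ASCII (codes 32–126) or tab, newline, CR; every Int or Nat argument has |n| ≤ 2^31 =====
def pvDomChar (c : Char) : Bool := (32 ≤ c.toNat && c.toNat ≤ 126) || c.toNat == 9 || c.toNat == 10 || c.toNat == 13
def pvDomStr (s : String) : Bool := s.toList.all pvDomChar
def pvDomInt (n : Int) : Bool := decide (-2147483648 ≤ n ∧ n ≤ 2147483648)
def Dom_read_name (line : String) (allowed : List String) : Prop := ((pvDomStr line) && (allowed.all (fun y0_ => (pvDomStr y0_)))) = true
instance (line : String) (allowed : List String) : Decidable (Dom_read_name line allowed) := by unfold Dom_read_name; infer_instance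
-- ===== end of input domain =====

-- B replaces A's single interleaved scan by: find the delimiter first, then validate the
-- prefix slice, then slice (objective: alternative decomposition, same cost).
-- All raising paths of both programs are excluded by Pre_read_name.

-- shared helper: "c.isalnum() or c in allowed"
def pvValidChar (allowed : List String) (c : Char) : Bool :=
  PySem.Chars.isalnum c || allowed.contains (String.singleton c)

-- membership test c in ;: pair
def pvDelim (c : Char) : Bool := c == ';' || c == ':'

-- ===== PORT A =====
-- the 'while idx < n' loop of A
def readNameLoopA (cs : List Char) (allowed : List String) (idx : Nat) : String × String :=
  if h : idx < cs.length then
    let c := cs[idx]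
    if pvDelim c then
      (String.ofList (PySem.List.slice cs none (some (idx : Int))),
       String.ofList (PySem.List.slice cs (some (idx : Int)) none))
    else if pvValidChar allowed c then
      readNameLoopA cs allowed (idx + 1)
    else ("", "")   -- SyntaxError: unexpected character (excluded by Pre_)
  else ("", "")     -- SyntaxError: unexpected end of line (excluded by Pre_)
  termination_by cs.length - idx

def read_name (line : String) (allowed : List String) : String × String :=
  match PySem.List.pyGet? line.toList 0 with
  | none => ("", "")   -- IndexError on line[0] (excluded by Pre_)
  | some c =>
    if PySem.Chars.isalnum c || c == '-' then readNameLoopA line.toList allowed 1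
    else ("", "")       -- SyntaxError: unexpected character (excluded by Pre_)

-- ===== PORT B =====
def read_name_alt (line : String) (allowed : List String) : String × String :=
  let cs := line.toList
  match PySem.List.pyGet? cs 0 with
  | none => ("", "")   -- IndexError on line[0] (excluded by Pre_)
  | some c =>
    if PySem.Chars.isalnum c || c == '-' then
      -- p = next((k for k, ch in enumerate(line) if ch in (';', ':')), len(line))
      let p := (cs.findIdx? pvDelim).getD cs.length
      -- bad = next((ch for ch in line[1:p] if not valid), None)
      match (PySem.List.slice cs (some 1) (some (p : Int))).find?
              (fun ch => !(pvValidChar allowed ch)) with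
      | some _ => ("", "")   -- SyntaxError: unexpected character (excluded by Pre_)
      | none =>
        if p = cs.length then ("", "")   -- SyntaxError: unexpected end of line (excluded by Pre_)
        else (String.ofList (PySem.List.slice cs none (some (p : Int))),
              String.ofList (PySem.List.slice cs (some (p : Int)) none))
    else ("", "")   -- SyntaxError: unexpected character (excluded by Pre_)

-- ===== PRECONDITION & SPEC =====
-- Pre_ holds exactly where Python A returns: line is nonempty, its first character is
-- alphanumeric or '-', a ';'/':' delimiter occurs later, and every character before the
-- first delimiter is alphanumeric or in allowed. Everywhere else A raises.
def Pre_read_name (line : String) (allowed : List String) : Prop :=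
  line.toList ≠ [] ∧
  (PySem.Chars.isalnum (line.toList.headD ' ') || line.toList.headD ' ' == '-') = true ∧
  (line.toList.tail.takeWhile (fun ch => !(pvDelim ch))).length < line.toList.tail.length ∧
  (line.toList.tail.takeWhile (fun ch => !(pvDelim ch))).all (pvValidChar allowed) = true
instance (line : String) (allowed : List String) : Decidable (Pre_read_name line allowed) := by
  unfold Pre_read_name; infer_instance
def pvWitness_read_name : String × List String := ("a-b:value", ["-", "_", ".", "@"])
def Spec_read_name (line : String) (allowed : List String) (out : String × String) : Prop := out = read_name_alt line allowed
instance (line : String) (allowed : List String) (out : String × String) : Decidable (Spec_read_name line allowed out) := by unfold Spec_read_name; infer_instance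

-- ===== CLAIM (what is proved, stated in full; the proofs are below) =====
def Claim_equal_read_name : Prop := ∀ (line : String) (allowed : List String), Dom_read_name line allowed → Pre_read_name line allowed → Spec_read_name line allowed (read_name line allowed)

-- ===== LEMMAS AND PROOFS =====

-- findIdx? of the first failure of q is the length of takeWhile q, when a failure exists
theorem findIdx?_eq_length_takeWhile_not (q : Char → Bool) (l : List Char)
    (h : (l.takeWhile (fun a => !q a)).length < l.length) :
    l.findIdx? q = some (l.takeWhile (fun a => !q a)).length := by
  induction l with
  | nil => simp at h
  | cons x xs ih =>
    by_cases hx : q x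
    · simp [List.findIdx?_cons, hx]
    · simp only [List.takeWhile_cons, hx, Bool.not_false, if_true, List.length_cons] at h ⊢
      have := ih (by omega)
      simp [List.findIdx?_cons, hx, this]

-- the element at the end of takeWhile fails the predicate
theorem takeWhile_stop (q : Char → Bool) (l : List Char)
    (h : (l.takeWhile q).length < l.length) :
    q (l[(l.takeWhile q).length]'h) = false := by
  induction l with
  | nil => simp at h
  | cons x xs ih =>
    by_cases hx : q x
    · simp only [List.takeWhile_cons, hx, if_true, List.length_cons] at h ⊢
      exact ih (by omega)
    · simp [List.takeWhile_cons, hx, Bool.eq_false_iff.mpr hx]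

-- elements strictly before the stop point satisfy the predicate
theorem takeWhile_sat (q : Char → Bool) (l : List Char) (j : Nat)
    (hj : j < (l.takeWhile q).length) (hjl : j < l.length) :
    q (l[j]'hjl) = true := by
  have hpre : l.takeWhile q <+: l := List.takeWhile_prefix q
  have : (l.takeWhile q)[j]'hj = l[j]'hjl := List.IsPrefix.getElem hpre hj
  rw [← this]
  exact List.mem_takeWhile_imp (List.getElem_mem hj)

-- A's loop reaches the delimiter at position 1 + L and returns the slices there
theorem loopA_eq (cs : List Char) (allowed : List String) (L : Nat)
    (hLlt : 1 + L < cs.length)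
    (hdelim : pvDelim (cs[1 + L]'hLlt) = true)
    (hvalid : ∀ k (hk : k < cs.length), 1 ≤ k → k < 1 + L →
        pvValidChar allowed (cs[k]'hk) = true ∧ pvDelim (cs[k]'hk) = false) :
    ∀ j, j ≤ L → readNameLoopA cs allowed (1 + j) =
      (String.ofList (PySem.List.slice cs none (some ((1 + L : Nat) : Int))),
       String.ofList (PySem.List.slice cs (some ((1 + L : Nat) : Int)) none)) := by
  intro j hj
  induction hm : L - j generalizing j with
  | zero =>
    have hjL : j = L := by omega
    subst hjL
    rw [readNameLoopA]
    simp only [hLlt, dif_pos, hdelim, if_pos]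
  | succ m ih =>
    have hjlt : j < L := by omega
    have hk : 1 + j < cs.length := by omega
    obtain ⟨hv, hd⟩ := hvalid (1 + j) hk (by omega) (by omega)
    rw [readNameLoopA]
    simp only [hk, dif_pos, hd, Bool.false_eq_true, if_false, hv, if_pos]
    have := ih (j + 1) (by omega) (by omega)
    simpa [Nat.add_comm, Nat.add_assoc, Nat.add_left_comm] using this

-- ===== VERDICT (by name: the statement is the Claim_ definition above) =====
theorem read_name_spec : Claim_equal_read_name := by
  intro line allowed _hdom hpre
  obtain ⟨hne, hhead, hlt, hall⟩ := hpre
  unfold Spec_read_name read_name read_name_alt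
  obtain ⟨c, rest, hcs⟩ : ∃ c rest, line.toList = c :: rest := by
    cases h : line.toList with
    | nil => exact absurd h hne
    | cons a as => exact ⟨a, as, rfl⟩
  rw [hcs] at hhead hlt hall ⊢
  simp only [List.headD_cons] at hhead
  simp only [List.tail_cons] at hlt hall
  set pref := rest.takeWhile (fun ch => !(pvDelim ch)) with hpref
  set L := pref.length with hLdef
  -- first character passes, and is not a delimiter
  have hc0 : (PySem.Chars.isalnum c || c == '-') = true := hhead
  have hcnd : pvDelim c = false := by
    rcases Bool.or_eq_true_iff.mp hc0 with h1 | h1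
    · by_contra hd
      have hd' : pvDelim c = true := by revert hd; cases pvDelim c <;> simp
      rcases Bool.or_eq_true_iff.mp hd' with h2 | h2
      · rw [beq_iff_eq.mp h2] at h1; exact absurd h1 (by decide)
      · rw [beq_iff_eq.mp h2] at h1; exact absurd h1 (by decide)
    · rw [beq_iff_eq.mp h1]; decide
  -- the delimiter position
  have hfind : (c :: rest).findIdx? pvDelim = some (1 + L) := by
    have hr : rest.findIdx? pvDelim = some L :=
      findIdx?_eq_length_takeWhile_not pvDelim rest hlt
    simp [List.findIdx?_cons, hcnd, hr, Nat.add_comm]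
  have hLlt : 1 + L < (c :: rest).length := by
    simp only [List.length_cons]; omega
  -- slice cs 1 (1+L) = pref
  have hslice : PySem.List.slice (c :: rest) (some 1) (some ((1 + L : Nat) : Int)) = pref := by
    have h1 : ((1 : Nat) : Int) = (1 : Int) := rfl
    rw [← h1, PySem.List.slice_natCast]
    simp only [List.drop_one, List.tail_cons]
    have : (1 + L) - 1 = L := by omega
    rw [this]
    have hpre : pref <+: rest := List.takeWhile_prefix _
    exact (List.prefix_iff_eq_take.mp hpre).symm
  -- B's validation pass finds nothing
  have hfindnone : pref.find? (fun ch => !(pvValidChar allowed ch)) = none := by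
    rw [List.find?_eq_none]
    intro x hx
    have := List.all_eq_true.mp hall x hx
    simp [this]
  -- delimiter and validity facts for A's loop
  have hdelim : pvDelim ((c :: rest)[1 + L]'hLlt) = true := by
    have hL : L < rest.length := hlt
    have hstop := takeWhile_stop (fun ch => !(pvDelim ch)) rest hlt
    have hget : (c :: rest)[1 + L]'hLlt = rest[L]'hL := by
      simp only [show 1 + L = L + 1 from by omega, List.getElem_cons_succ]
    rw [hget]
    simpa using hstop
  have hvalid : ∀ k (hk : k < (c :: rest).length), 1 ≤ k → k < 1 + L →
      pvValidChar allowed ((c :: rest)[k]'hk) = true ∧ pvDelim ((c :: rest)[k]'hk) = false := by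
    intro k hk h1 h2
    obtain ⟨j, rfl⟩ : ∃ j, k = j + 1 := ⟨k - 1, by omega⟩
    have hj : j < L := by omega
    have hjr : j < rest.length := by omega
    have hget : (c :: rest)[j + 1]'hk = rest[j]'hjr := by simp
    rw [hget]
    constructor
    · have hmem : rest[j]'hjr ∈ pref := by
        have hpre : pref <+: rest := List.takeWhile_prefix _
        have : pref[j]'hj = rest[j]'hjr := List.IsPrefix.getElem hpre hj
        rw [← this]; exact List.getElem_mem hj
      exact List.all_eq_true.mp hall _ hmem
    · have := takeWhile_sat (fun ch => !(pvDelim ch)) rest j hj hjr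
      simpa using this
  -- evaluate both sides
  have hA := loopA_eq (c :: rest) allowed L hLlt hdelim hvalid 0 (by omega)
  simp only [PySem.List.pyGet?_zero_cons, hc0, if_pos, hfind, Option.getD_some]
  rw [hA]
  have hne' : ¬ (1 + L = (c :: rest).length) := by
    simp only [List.length_cons]; omega
  rw [hslice, hfindnone]
  simp only [hne', if_false]
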